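-- pv_equiv track=rewrite | github.com/rinodehi1978/resell-trap | src/yafuama/matcher.py | _merge_product_number_tokens
-- ===== SOURCE A (Python) =====
-- _MERGE_PREFIX_WORDS = frozenset({"hero"})
--
-- def _merge_product_number_tokens(tokens: list[str]) -> list[str]:
--     """Merge product line names with adjacent number tokens.
--
--     Example: ["gopro", "hero", "12", "black"] → ["gopro", "hero12", "black"]
--     Handles GoPro Hero series where katakana "ヒーロー12" splits into
--     "hero" + "12" after synonym replacement.
--     """
--     result: list[str] = []
--     i = 0
--     while i < len(tokens):
--         if (
--             i + 1 < len(tokens)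
--             and tokens[i] in _MERGE_PREFIX_WORDS
--             and tokens[i + 1].isdigit()
--         ):
--             result.append(tokens[i] + tokens[i + 1])
--             i += 2
--         else:
--             result.append(tokens[i])
--             i += 1
--     return result
-- ===== SOURCE B (Python) =====
-- _MERGE_PREFIX_WORDS = frozenset({"hero"})
--
-- def _merge_product_number_tokens(tokens: list[str]) -> list[str]:
--     """Look-behind merge: a digit token is absorbed into the previously
--     emitted token when that token is a merge-prefix word."""
--     result: list[str] = []
--     for token in tokens:
--         if token.isdigit() and result and result[-1] in _MERGE_PREFIX_WORDS:
--             result[-1] = result[-1] + token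
--         else:
--             result.append(token)
--     return result
-- ===== Notes on version B (the rewrite author's own statement) =====
-- stated objective: simpler
-- what changed: Replaces A's index-based while loop with look-ahead and an i+=2 skip by a single look-behind for-loop that merges a digit token into the last emitted element.
import Mathlib
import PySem

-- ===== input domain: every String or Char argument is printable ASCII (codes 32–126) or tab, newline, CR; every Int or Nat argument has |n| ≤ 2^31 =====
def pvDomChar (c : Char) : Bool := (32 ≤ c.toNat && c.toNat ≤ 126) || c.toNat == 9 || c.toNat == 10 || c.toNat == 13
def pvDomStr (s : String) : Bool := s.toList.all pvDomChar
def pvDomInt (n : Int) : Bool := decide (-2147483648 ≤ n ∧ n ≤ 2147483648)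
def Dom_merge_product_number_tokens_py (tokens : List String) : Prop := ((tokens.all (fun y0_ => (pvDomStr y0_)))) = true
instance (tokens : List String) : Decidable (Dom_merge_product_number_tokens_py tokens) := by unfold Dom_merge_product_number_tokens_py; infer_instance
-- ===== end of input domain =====

-- B: look-behind merge in one for-loop instead of A's look-ahead while-loop with index skip; same outputs, same cost.

-- ===== PORT A =====
def pvMergePrefixWords : List String := ["hero"]

def merge_product_number_tokens_py : List String → List String
  | [] => []
  | t :: rest =>
    match rest with
    | t2 :: rest2 =>
      if pvMergePrefixWords.contains t ∧ PySem.Str.strIsdigit t2 then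
        (t ++ t2) :: merge_product_number_tokens_py rest2
      else
        t :: merge_product_number_tokens_py (t2 :: rest2)
    | [] => [t]

-- ===== PORT B =====
def pvStepB (result : List String) (token : String) : List String :=
  if PySem.Str.strIsdigit token ∧ result ≠ [] ∧ pvMergePrefixWords.contains (result.getLastD "") then
    result.dropLast ++ [result.getLastD "" ++ token]
  else
    result ++ [token]

def merge_product_number_tokens_py_alt (tokens : List String) : List String :=
  tokens.foldl pvStepB []

-- ===== PRECONDITION & SPEC =====
def Spec_merge_product_number_tokens_py (tokens : List String) (out : List String) : Prop := out = merge_product_number_tokens_py_alt tokens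
instance (tokens : List String) (out : List String) : Decidable (Spec_merge_product_number_tokens_py tokens out) := by unfold Spec_merge_product_number_tokens_py; infer_instance

-- ===== CLAIM (what is proved, stated in full; the proofs are below) =====
def Claim_equal_merge_product_number_tokens_py : Prop := ∀ (tokens : List String), Dom_merge_product_number_tokens_py tokens → Spec_merge_product_number_tokens_py tokens (merge_product_number_tokens_py tokens)

-- ===== LEMMAS AND PROOFS =====
lemma pvStepB_ne_nil (l : List String) (t : String) : pvStepB l t ≠ [] := by
  unfold pvStepB; split <;> simp

lemma pvStepB_append (acc l : List String) (t : String) (h : l ≠ []) :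
    pvStepB (acc ++ l) t = acc ++ pvStepB l t := by
  rcases List.eq_nil_or_concat l with rfl | ⟨l', a, rfl⟩
  · exact absurd rfl h
  · simp only [List.concat_eq_append]
    unfold pvStepB
    by_cases hc : PySem.Str.strIsdigit t = true ∧ pvMergePrefixWords.contains a = true
    · rw [if_pos ⟨hc.1, by simp, by simpa using hc.2⟩, if_pos ⟨hc.1, by simp, by simpa using hc.2⟩]
      simp [← List.append_assoc]
    · rw [if_neg (by rintro ⟨h1, -, h3⟩; exact hc ⟨h1, by simpa using h3⟩),
        if_neg (by rintro ⟨h1, -, h3⟩; exact hc ⟨h1, by simpa using h3⟩)]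
      simp

lemma pvFoldl_append (ts : List String) (acc l : List String) (h : l ≠ []) :
    List.foldl pvStepB (acc ++ l) ts = acc ++ List.foldl pvStepB l ts := by
  induction ts generalizing l with
  | nil => simp
  | cons t ts ih =>
    simp only [List.foldl_cons, pvStepB_append acc l t h]
    exact ih _ (pvStepB_ne_nil l t)

lemma pvStepB_nil (t : String) : pvStepB [] t = [t] := by
  unfold pvStepB; simp

lemma pvSingleton_cons (ts : List String) (x : String)
    (h : ¬ pvMergePrefixWords.contains x = true) :
    List.foldl pvStepB [x] ts = x :: List.foldl pvStepB [] ts := by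
  cases ts with
  | nil => rfl
  | cons r rs =>
    have h1 : pvStepB [x] r = [x] ++ [r] := by
      unfold pvStepB
      rw [if_neg (by rintro ⟨-, -, hc⟩; exact h (by simpa using hc))]
    simp only [List.foldl_cons, h1, pvStepB_nil,
      pvFoldl_append rs [x] [r] (by simp)]
    rfl

lemma pvMerged_not_prefix (t t2 : String)
    (hm : pvMergePrefixWords.contains t = true) (hd : PySem.Str.strIsdigit t2 = true) :
    ¬ pvMergePrefixWords.contains (t ++ t2) = true := by
  have ht : t = "hero" := by simpa [pvMergePrefixWords] using hm
  subst ht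
  intro hc
  have hc' : "hero" ++ t2 = "hero" := by simpa [pvMergePrefixWords] using hc
  have hl : t2.toList = [] := by
    have h3 := congrArg String.toList hc'
    simpa using h3
  have hd' : PySem.Chars.strIsdigit t2.toList = true := by simpa using hd
  rw [hl] at hd'
  exact absurd hd' (by decide)

lemma pvMain (ts : List String) :
    merge_product_number_tokens_py ts = List.foldl pvStepB [] ts := by
  induction ts using merge_product_number_tokens_py.induct with
  | case1 => rfl
  | case2 t t2 rest2 hcond ih =>
    obtain ⟨hm, hd⟩ := hcond
    have h1 : pvStepB [t] t2 = [t ++ t2] := by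
      unfold pvStepB
      rw [if_pos ⟨hd, by simp, by simpa using hm⟩]
      rfl
    rw [merge_product_number_tokens_py, if_pos ⟨hm, hd⟩, ih]
    simp only [List.foldl_cons, pvStepB_nil, h1]
    exact (pvSingleton_cons rest2 (t ++ t2) (pvMerged_not_prefix t t2 hm hd)).symm
  | case3 t t2 rest2 hcond ih =>
    rw [merge_product_number_tokens_py, if_neg hcond, ih]
    by_cases hm : pvMergePrefixWords.contains t = true
    · have hd : PySem.Str.strIsdigit t2 = false := by
        by_contra hdd
        exact hcond ⟨hm, by simpa using hdd⟩
      have h1 : pvStepB [t] t2 = [t] ++ [t2] := by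
        unfold pvStepB
        rw [if_neg (by rintro ⟨hdt, -, -⟩; rw [hd] at hdt; exact Bool.false_ne_true hdt)]
      rw [show List.foldl pvStepB [] (t :: t2 :: rest2)
            = List.foldl pvStepB ([t] ++ [t2]) rest2 from by
          rw [List.foldl_cons, pvStepB_nil, List.foldl_cons, h1],
        pvFoldl_append rest2 [t] [t2] (by simp),
        show List.foldl pvStepB [] (t2 :: rest2) = List.foldl pvStepB [t2] rest2 from by
          rw [List.foldl_cons, pvStepB_nil]]
      rfl
    · rw [show List.foldl pvStepB [] (t :: t2 :: rest2)
            = List.foldl pvStepB [t] (t2 :: rest2) from by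
          rw [List.foldl_cons, pvStepB_nil]]
      exact (pvSingleton_cons (t2 :: rest2) t hm).symm
  | case4 t =>
    rw [merge_product_number_tokens_py]
    simp [pvStepB_nil]

-- ===== VERDICT (by name: the statement is the Claim_ definition above) =====
theorem merge_product_number_tokens_py_spec : Claim_equal_merge_product_number_tokens_py := by
  intro tokens _
  unfold Spec_merge_product_number_tokens_py merge_product_number_tokens_py_alt
  exact pvMain tokens
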